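-- pv_equiv track=rewrite | github.com/jso122-2/DAWN_pub_real | memories/memory_weaver.py | detect_emotional_pattern
-- ===== SOURCE A (Python) =====
-- from typing import List, Tuple, Dict, Optional
--
-- PATTERN_MIN_LENGTH = 3  # Minimum interactions to form a pattern
--
-- EMOTIONAL_PATTERNS = {
--     "Pressure → Void": ["Contained Burn", "Contained Burn", "Hollow Echo"],
--     "Drowning Cycle": ["Submerged", "Drifting", "Submerged"],
--     "Shatter Point": ["Contained Burn", "Sharp Edge", "Hollow Echo"],
--     "Clarity Emergence": ["Drifting", "Contemplative", "Crystalline"],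
--     "Void Spiral": ["Hollow Echo", "Drifting", "Hollow Echo"],
--     "Pressure Cascade": ["Contained Burn", "Turbulent", "Sharp Edge"]
-- }
--
-- def detect_emotional_pattern(recent_moods: List[str]) -> Optional[str]:
--     """
--     Patterns emerge from repetition.
--     Consciousness recognizes its own loops.
--     """
--     if len(recent_moods) < PATTERN_MIN_LENGTH:
--         return None
--
--     # Check each known pattern
--     for pattern_name, pattern_sequence in EMOTIONAL_PATTERNS.items():
--         pattern_length = len(pattern_sequence)
--
--         # Slide through recent moods looking for matches
--         for i in range(len(recent_moods) - pattern_length + 1):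
--             window = recent_moods[i:i + pattern_length]
--             if window == pattern_sequence:
--                 return pattern_name
--
--     # Check for custom repetition patterns
--     if len(recent_moods) >= 4:
--         # Simple ABAB pattern
--         if (recent_moods[-4] == recent_moods[-2] and
--             recent_moods[-3] == recent_moods[-1] and
--             recent_moods[-4] != recent_moods[-3]):
--             return "Binary Oscillation"
--
--         # Stuck pattern (same mood 4+ times)
--         if len(set(recent_moods[-4:])) == 1:
--             mood = recent_moods[-1]
--             return f"Locked in {mood}"
--
--     return None
-- ===== SOURCE B (Python) =====
-- from typing import List, Optional
--
-- PATTERN_MIN_LENGTH = 3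
--
-- EMOTIONAL_PATTERNS = {
--     "Pressure → Void": ["Contained Burn", "Contained Burn", "Hollow Echo"],
--     "Drowning Cycle": ["Submerged", "Drifting", "Submerged"],
--     "Shatter Point": ["Contained Burn", "Sharp Edge", "Hollow Echo"],
--     "Clarity Emergence": ["Drifting", "Contemplative", "Crystalline"],
--     "Void Spiral": ["Hollow Echo", "Drifting", "Hollow Echo"],
--     "Pressure Cascade": ["Contained Burn", "Turbulent", "Sharp Edge"]
-- }
--
-- def detect_emotional_pattern(recent_moods: List[str]) -> Optional[str]:
--     if len(recent_moods) < PATTERN_MIN_LENGTH: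
--         return None
--
--     # One pass: index every length-3 window, then constant-many set lookups.
--     windows = {tuple(recent_moods[i:i + 3]) for i in range(len(recent_moods) - 2)}
--     for pattern_name, pattern_sequence in EMOTIONAL_PATTERNS.items():
--         if tuple(pattern_sequence) in windows:
--             return pattern_name
--
--     if len(recent_moods) >= 4:
--         if (recent_moods[-4] == recent_moods[-2] and
--             recent_moods[-3] == recent_moods[-1] and
--             recent_moods[-4] != recent_moods[-3]):
--             return "Binary Oscillation"
--         if len(set(recent_moods[-4:])) == 1:
--             mood = recent_moods[-1]
--             return f"Locked in {mood}"
--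
--     return None
-- ===== Notes on version B (the rewrite author's own statement) =====
-- stated objective: faster
-- what changed: Replaces the nested pattern-by-pattern slide over the mood list with a single pass that indexes all length-3 windows into a set, followed by one O(1) membership lookup per pattern (pattern dict order, hence tie-breaking, preserved).
import Mathlib
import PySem

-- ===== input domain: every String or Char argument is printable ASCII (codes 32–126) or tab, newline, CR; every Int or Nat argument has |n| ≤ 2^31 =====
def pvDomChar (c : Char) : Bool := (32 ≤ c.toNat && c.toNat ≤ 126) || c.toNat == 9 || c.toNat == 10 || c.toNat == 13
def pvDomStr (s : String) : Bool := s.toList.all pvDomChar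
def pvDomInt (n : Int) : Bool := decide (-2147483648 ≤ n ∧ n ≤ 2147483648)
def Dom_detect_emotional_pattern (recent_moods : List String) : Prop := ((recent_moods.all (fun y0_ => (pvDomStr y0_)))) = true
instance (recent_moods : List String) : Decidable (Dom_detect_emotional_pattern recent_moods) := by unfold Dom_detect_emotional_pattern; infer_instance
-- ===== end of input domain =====

-- B replaces A's pattern-by-pattern slide over the moods with one pass that indexes
-- every length-3 window into a set, then a single lookup per pattern (alternative).

-- EMOTIONAL_PATTERNS, in dict insertion order (shared module constant of both Pythons)
def pvEmotionalPatterns : List (String × List String) :=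
  [("Pressure → Void", ["Contained Burn", "Contained Burn", "Hollow Echo"]),
   ("Drowning Cycle", ["Submerged", "Drifting", "Submerged"]),
   ("Shatter Point", ["Contained Burn", "Sharp Edge", "Hollow Echo"]),
   ("Clarity Emergence", ["Drifting", "Contemplative", "Crystalline"]),
   ("Void Spiral", ["Hollow Echo", "Drifting", "Hollow Echo"]),
   ("Pressure Cascade", ["Contained Burn", "Turbulent", "Sharp Edge"])]

-- the block after the known-pattern loop, byte-identical in A and B (shared tail)
def pvCustomTail (recent_moods : List String) : Option String :=
  if (recent_moods.length : Int) ≥ 4 then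
    if PySem.List.pyGetD recent_moods (-4) "" == PySem.List.pyGetD recent_moods (-2) ""
       && PySem.List.pyGetD recent_moods (-3) "" == PySem.List.pyGetD recent_moods (-1) ""
       && PySem.List.pyGetD recent_moods (-4) "" != PySem.List.pyGetD recent_moods (-3) "" then
      some "Binary Oscillation"
    else if (PySem.Set.ofList (PySem.List.slice recent_moods (some (-4)) none)).length == 1 then
      some ("Locked in " ++ PySem.List.pyGetD recent_moods (-1) "")
    else none
  else none

-- ===== PORT A =====
-- A's outer loop over the patterns; the inner for-with-return is the `any` over the slide
def pvScanA (moods : List String) : List (String × List String) → Option String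
  | [] => none
  | (name, seq) :: rest =>
      if (PySem.List.pyRange 0 ((moods.length : Int) - (seq.length : Int) + 1) 1).any
           (fun i => PySem.List.slice moods (some i) (some (i + (seq.length : Int))) == seq) then
        some name
      else pvScanA moods rest

def detect_emotional_pattern (recent_moods : List String) : Option String :=
  if (recent_moods.length : Int) < 3 then none
  else
    match pvScanA recent_moods pvEmotionalPatterns with
    | some name => some name
    | none => pvCustomTail recent_moods

-- ===== PORT B =====
def pvFindB (windows : PySem.Set (List String)) : List (String × List String) → Option String
  | [] => none
  | (name, seq) :: rest =>
      if windows.contains seq then some name else pvFindB windows rest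

def detect_emotional_pattern_alt (recent_moods : List String) : Option String :=
  if (recent_moods.length : Int) < 3 then none
  else
    let windows : PySem.Set (List String) :=
      PySem.Set.ofList ((PySem.List.pyRange 0 ((recent_moods.length : Int) - 2) 1).map
        (fun i => PySem.List.slice recent_moods (some i) (some (i + 3))))
    match pvFindB windows pvEmotionalPatterns with
    | some name => some name
    | none => pvCustomTail recent_moods

-- ===== PRECONDITION & SPEC =====
def Spec_detect_emotional_pattern (recent_moods : List String) (out : Option String) : Prop := out = detect_emotional_pattern_alt recent_moods
instance (recent_moods : List String) (out : Option String) : Decidable (Spec_detect_emotional_pattern recent_moods out) := by unfold Spec_detect_emotional_pattern; infer_instance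

-- ===== CLAIM (what is proved, stated in full; the proofs are below) =====
def Claim_equal_detect_emotional_pattern : Prop := ∀ (recent_moods : List String), Dom_detect_emotional_pattern recent_moods → Spec_detect_emotional_pattern recent_moods (detect_emotional_pattern recent_moods)

-- ===== LEMMAS AND PROOFS =====

-- A's slide test for a length-3 pattern equals B's window-set membership test
lemma pvSlide_eq_mem (moods seq : List String) (h3 : seq.length = 3) :
    ((PySem.List.pyRange 0 ((moods.length : Int) - (seq.length : Int) + 1) 1).any
       (fun i => PySem.List.slice moods (some i) (some (i + (seq.length : Int))) == seq))
    = (PySem.Set.ofList ((PySem.List.pyRange 0 ((moods.length : Int) - 2) 1).map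
        (fun i => PySem.List.slice moods (some i) (some (i + 3))))).contains seq := by
  have hb : (moods.length : Int) - (seq.length : Int) + 1 = (moods.length : Int) - 2 := by
    rw [h3]; push_cast; ring
  rw [hb, h3]
  push_cast
  rw [Bool.eq_iff_iff, List.any_eq_true, PySem.Set.contains_iff, PySem.Set.mem_ofList]
  constructor
  · rintro ⟨i, hi, hs⟩
    exact List.mem_map.mpr ⟨i, hi, beq_iff_eq.mp hs⟩
  · intro hm
    rcases List.mem_map.mp hm with ⟨i, hi, hs⟩
    exact ⟨i, hi, beq_iff_eq.mpr hs⟩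

lemma pvScan_eq_find (moods : List String) (pats : List (String × List String))
    (hlen : ∀ p ∈ pats, p.2.length = 3) :
    pvScanA moods pats
      = pvFindB (PySem.Set.ofList ((PySem.List.pyRange 0 ((moods.length : Int) - 2) 1).map
          (fun i => PySem.List.slice moods (some i) (some (i + 3))))) pats := by
  induction pats with
  | nil => rfl
  | cons p rest ih =>
      obtain ⟨name, seq⟩ := p
      have h3 : seq.length = 3 := hlen _ (List.mem_cons_self ..)
      simp only [pvScanA, pvFindB, pvSlide_eq_mem moods seq h3]
      split <;> [rfl; exact ih (fun q hq => hlen q (List.mem_cons_of_mem _ hq))]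

-- ===== VERDICT (by name: the statement is the Claim_ definition above) =====
theorem detect_emotional_pattern_spec : Claim_equal_detect_emotional_pattern := by
  intro moods _hdom
  unfold Spec_detect_emotional_pattern detect_emotional_pattern detect_emotional_pattern_alt
  by_cases h : (moods.length : Int) < 3
  · simp [h]
  · simp only [h, if_false]
    rw [pvScan_eq_find moods pvEmotionalPatterns (by decide)]
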